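-- pv_equiv track=rewrite | github.com/H1rono/atcoder-answers | ABC268/d.py | solve
-- ===== SOURCE A (Python) =====
-- from itertools import permutations
-- from collections import deque
--
-- def solve(n, m, s, t):
--     it = permutations(range(n))
--     for rep in it:
--         l = [s[i] for i in rep]
--         x_orders = deque([[1] * (n - 1)])
--         # dfs
--         while x_orders:
--             x_order = x_orders.pop()
--             x = ""
--             for i in range(n):
--                 x += l[i]
--                 if i < n - 1:
--                     x += '_' * x_order[i]
--             if x not in t:
--                 return x
--             if len(x) == 16:
--                 continue
--             for i in range(n - 1):
--                 x_order[i] += 1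
--                 x_orders.append(x_order[:])
--                 x_order[i] -= 1
--         return "-1"
-- ===== SOURCE B (Python) =====
-- def solve(n, m, s, t):
--     # Recursive depth-first search over the underscore-gap vectors (child i
--     # increments gap i; children visited from the last gap down, matching the
--     # stack order), returning the first name not in the forbidden set.
--     names = [s[i] for i in range(n)]
--     forbidden = set(t)
--
--     def build(gaps):
--         out = names[0] if names else ""
--         for name, g in zip(names[1:], gaps):
--             out += "_" * g + name
--         return out
--
--     def dfs(gaps):
--         x = build(gaps)
--         if x not in forbidden:
--             return x
--         if len(x) == 16:
--             return None
--         for i in reversed(range(n - 1)):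
--             r = dfs(gaps[:i] + (gaps[i] + 1,) + gaps[i + 1:])
--             if r is not None:
--                 return r
--         return None
--
--     r = dfs(tuple([1] * (n - 1)))
--     return r if r is not None else "-1"
-- ===== Notes on version B (the rewrite author's own statement) =====
-- stated objective: alternative
-- what changed: Replaces the explicit deque-based DFS loop (and the never-advanced permutations iterator) with a direct short-circuiting recursion over gap vectors, testing membership against a precomputed set of forbidden names.
import Mathlib
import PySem

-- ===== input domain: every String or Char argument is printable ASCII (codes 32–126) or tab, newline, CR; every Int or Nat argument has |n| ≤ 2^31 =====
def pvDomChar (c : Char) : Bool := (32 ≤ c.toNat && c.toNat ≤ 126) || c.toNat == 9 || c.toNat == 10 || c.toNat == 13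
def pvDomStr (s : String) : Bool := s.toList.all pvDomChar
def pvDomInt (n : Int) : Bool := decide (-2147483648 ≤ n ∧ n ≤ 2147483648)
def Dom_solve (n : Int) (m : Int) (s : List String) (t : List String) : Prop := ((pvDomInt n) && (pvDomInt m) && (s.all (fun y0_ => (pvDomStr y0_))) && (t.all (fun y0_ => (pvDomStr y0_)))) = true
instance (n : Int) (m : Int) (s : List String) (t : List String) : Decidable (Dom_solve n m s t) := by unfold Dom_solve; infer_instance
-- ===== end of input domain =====

-- B replaces A's explicit deque-based DFS loop by a short-circuiting recursion over the
-- gap vectors (same visit order); equivalence of the return values is proved below.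

-- ===== PORT A =====

-- longest length of a string in t (used by both ports to size their totality fuel guard)
def pvMaxLen (t : List String) : Nat := ((t.map String.toList).map List.length).foldl max 0

-- x = ""; for i in range(n): x += l[i]; if i < n-1: x += '_' * x_order[i]
-- (indices are exact: every use has 0 ≤ i < len(l), resp. < len(x_order), so getD is unreachable)
def pvBuildA (n : Int) (l : List (List Char)) (xo : List Int) : List Char :=
  (PySem.List.pyRange 0 n).foldl (fun x i =>
    let x := x ++ PySem.List.pyGetD l i []
    if i < n - 1 then x ++ PySem.List.pyRepeat ['_'] (PySem.List.pyGetD xo i 0) else x) []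

-- x_order[i] += 1; x_orders.append(x_order[:]); x_order[i] -= 1   (0 ≤ i < len(x_order) at every use)
def pvChildA (xo : List Int) (i : Int) : List Int :=
  xo.set i.toNat (PySem.List.pyGetD xo i 0 + 1)

-- the while-loop over the deque; the deque's right end (pop/append side) is the list head.
-- fuel is a totality guard only; solve passes enough fuel (proved below), so "-1" at fuel 0 is unreachable.
def pvRunA (n : Int) (l : List (List Char)) (ts : List (List Char)) : Nat → List (List Int) → List Char
  | 0, _ => ['-', '1']
  | _ + 1, [] => ['-', '1']
  | fuel + 1, xo :: rest =>
    let x := pvBuildA n l xo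
    if x ∉ ts then x
    else if x.length = 16 then pvRunA n l ts fuel rest
    else pvRunA n l ts fuel ((PySem.List.pyRange 0 (n - 1)).foldl (fun st i => pvChildA xo i :: st) rest)

-- for rep in permutations(range(n)): the body always returns during its FIRST iteration
-- (the while-loop ends in 'return "-1"'), and the first permutation of range(n) is
-- (0, 1, …, n-1) itself; so the loop is ported as that single iteration with rep = range(n).
def solve (n : Int) (m : Int) (s : List String) (t : List String) : String :=
  let l := (PySem.List.pyRange 0 n).map (fun i => ((PySem.List.pyGet? s i).getD "").toList)
  let fuel := (max n 2).toNat ^ (pvMaxLen t + 18)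
  String.ofList (pvRunA n l (t.map String.toList) fuel [List.replicate (n - 1).toNat 1])

-- ===== PORT B =====

-- out = names[0] if names else "";  for name, g in zip(names[1:], gaps): out += "_" * g + name
def pvBuildB (names : List (List Char)) (gaps : List Int) : List Char :=
  let out := match names with | [] => [] | nm :: _ => nm
  ((names.drop 1).zip gaps).foldl (fun out p => out ++ PySem.List.pyRepeat ['_'] p.2 ++ p.1) out

-- gaps[:i] + (gaps[i] + 1,) + gaps[i+1:]   (0 ≤ i < len(gaps) at every use)
def pvChildB (gaps : List Int) (i : Int) : List Int :=
  PySem.List.slice gaps none (some i) ++ [PySem.List.pyGetD gaps i 0 + 1]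
    ++ PySem.List.slice gaps (some (i + 1)) none

-- def dfs(gaps): … ; fuel is a totality guard only (Source B's recursion terminates because
-- names grow along every path); solve_alt passes enough fuel (proved below).
def pvDfsB (n : Int) (names : List (List Char)) (forb : PySem.Set String) :
    Nat → List Int → Option (List Char)
  | 0, _ => none
  | fuel + 1, gaps =>
    let x := pvBuildB names gaps
    if ¬ PySem.Set.contains forb (String.ofList x) then some x
    else if x.length = 16 then none
    else (PySem.List.pyRange 0 (n - 1)).reverse.findSome?
           (fun i => pvDfsB n names forb fuel (pvChildB gaps i))

def solve_alt (n : Int) (m : Int) (s : List String) (t : List String) : String :=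
  let names := (PySem.List.pyRange 0 n).map (fun i => ((PySem.List.pyGet? s i).getD "").toList)
  let forb := PySem.Set.ofList t
  let fuel := pvMaxLen t + 18
  match pvDfsB n names forb fuel (List.replicate (n - 1).toNat 1) with
  | some x => String.ofList x
  | none => "-1"

-- ===== PRECONDITION & SPEC =====
-- A raises IndexError (s[i]) exactly when n > len(s); nothing else can raise.
def Pre_solve (n : Int) (m : Int) (s : List String) (t : List String) : Prop :=
  n ≤ (s.length : Int)
instance (n : Int) (m : Int) (s : List String) (t : List String) : Decidable (Pre_solve n m s t) := by
  unfold Pre_solve; infer_instance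

def pvWitness_solve : Int × Int × List String × List String := (2, 0, ["ab", "c"], ["ab_c"])

def Spec_solve (n : Int) (m : Int) (s : List String) (t : List String) (out : String) : Prop := out = solve_alt n m s t
instance (n : Int) (m : Int) (s : List String) (t : List String) (out : String) : Decidable (Spec_solve n m s t out) := by unfold Spec_solve; infer_instance

-- ===== CLAIM (what is proved, stated in full; the proofs are below) =====
def Claim_equal_solve : Prop := ∀ (n : Int) (m : Int) (s : List String) (t : List String), Dom_solve n m s t → Pre_solve n m s t → Spec_solve n m s t (solve n m s t)

-- ===== LEMMAS AND PROOFS =====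

-- canonical interleaving "name0 gap0 name1 gap1 … nameK" both builders compute
def pvTail : List (List Char) → List Int → List Char
  | b :: rest, g :: gs => List.replicate g.toNat '_' ++ b ++ pvTail rest gs
  | _, _ => []

def pvInter (l : List (List Char)) (gs : List Int) : List Char :=
  match l with
  | [] => []
  | a :: rest => a ++ pvTail rest gs

-- fuel needed by pvDfsB below a node whose built string is x (M = pvMaxLen t)
def pvNeed (M : Nat) (x : List Char) : Nat := M + 2 - min x.length (M + 1)

-- invariant of every gap vector the search touches
def pvGood (n : Int) (u : List Int) : Prop := u.length = (n - 1).toNat ∧ ∀ e ∈ u, 1 ≤ e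

lemma pvFindSome?_congr {α β : Type} {L : List α} {f g : α → Option β}
    (h : ∀ i ∈ L, f i = g i) : L.findSome? f = L.findSome? g := by
  induction L with
  | nil => rfl
  | cons a L ih =>
    cases hfa : g a <;>
      simp [h a (List.mem_cons_self), hfa,
        ih (fun i hi => h i (List.mem_cons_of_mem _ hi))]

def pvBodyN (l : List (List Char)) (xo : List Int) (x : List Char) (j : Nat) : List Char :=
  if j + 1 < l.length then x ++ l.getD j [] ++ List.replicate (xo.getD j 0).toNat '_'
  else x ++ l.getD j []

lemma pvZipFold : ∀ (rest : List (List Char)) (gs : List Int) (out : List Char),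
    (rest.zip gs).foldl (fun out p => out ++ PySem.List.pyRepeat ['_'] p.2 ++ p.1) out
      = out ++ pvTail rest gs := by
  intro rest
  induction rest with
  | nil => intro gs out; simp [pvTail]
  | cons b r ih =>
    intro gs out
    cases gs with
    | nil => simp [pvTail]
    | cons g gs' =>
      rw [List.zip_cons_cons, List.foldl_cons, ih]
      simp only [pvTail, PySem.List.pyRepeat_singleton, List.append_assoc]

lemma pvBuildB_eq (names : List (List Char)) (gaps : List Int) :
    pvBuildB names gaps = pvInter names gaps := by
  cases names with
  | nil => simp [pvBuildB, pvInter]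
  | cons a rest =>
    simp only [pvBuildB, List.drop_one, List.tail_cons]
    rw [pvZipFold]
    rfl

lemma pvTail_set_len : ∀ (rest : List (List Char)) (gs : List Int) (i : Nat),
    i < gs.length → gs.length ≤ rest.length → (∀ e ∈ gs, 0 ≤ e) →
    (pvTail rest (gs.set i (gs.getD i 0 + 1))).length = (pvTail rest gs).length + 1 := by
  intro rest
  induction rest with
  | nil =>
    intro gs i hi hle _
    have : gs.length = 0 := by simpa using hle
    omega
  | cons b r ih =>
    intro gs i hi hle hpos
    cases gs with
    | nil => simp at hi
    | cons g gs' =>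
      cases i with
      | zero =>
        have hg : (0:Int) ≤ g := hpos g (by simp)
        simp [pvTail, List.getD]
        omega
      | succ j =>
        have hs : (g :: gs').set (j + 1) ((g :: gs').getD (j + 1) 0 + 1)
            = g :: gs'.set j (gs'.getD j 0 + 1) := by
          rw [List.getD_cons_succ, List.set_cons_succ]
        rw [hs]
        have := ih gs' j (by simpa using hi) (by simpa using hle)
          (fun e he => hpos e (List.mem_cons_of_mem _ he))
        simp only [pvTail, List.length_append]
        rw [this]
        omega

lemma pvInter_set_len (names : List (List Char)) (gaps : List Int) (i : Nat)
    (h1 : names.length = gaps.length + 1) (hi : i < gaps.length)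
    (hpos : ∀ e ∈ gaps, 0 ≤ e) :
    (pvInter names (gaps.set i (gaps.getD i 0 + 1))).length = (pvInter names gaps).length + 1 := by
  cases names with
  | nil => simp at h1
  | cons a rest =>
    have := pvTail_set_len rest gaps i hi (by simp at h1; omega) hpos
    simp only [pvInter, List.length_append]
    rw [this]
    omega

lemma pvLen_le (t : List String) (x : List Char) (hx : x ∈ t.map String.toList) :
    x.length ≤ pvMaxLen t := by
  unfold pvMaxLen
  rw [List.foldl_map]
  exact (PySem.List.le_foldl_max_nat (t.map String.toList) List.length 0).2 x hx

lemma pvChild_eq (xo : List Int) (i : Int) (h0 : 0 ≤ i) (hi : i.toNat < xo.length) :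
    pvChildB xo i = xo.set i.toNat (xo.getD i.toNat 0 + 1) := by
  unfold pvChildB
  rw [PySem.List.slice_to _ h0, PySem.List.slice_from _ (by omega)]
  obtain ⟨k, rfl⟩ : ∃ k : Nat, i = (k : Int) := ⟨i.toNat, (Int.toNat_of_nonneg h0).symm⟩
  rw [PySem.List.pyGetD_natCast]
  have h1 : ((k : Int) + 1).toNat = k + 1 := by omega
  have h2 : (k : Int).toNat = k := by omega
  rw [h1, h2]
  have := List.set_eq_take_cons_drop (l := xo) (xo.getD k 0 + 1) (by omega : k < xo.length)
  rw [this]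
  simp

lemma pvChildA_eq (xo : List Int) (i : Int) (h0 : 0 ≤ i) :
    pvChildA xo i = xo.set i.toNat (xo.getD i.toNat 0 + 1) := by
  unfold pvChildA
  obtain ⟨k, rfl⟩ : ∃ k : Nat, i = (k : Int) := ⟨i.toNat, (Int.toNat_of_nonneg h0).symm⟩
  rw [PySem.List.pyGetD_natCast]
  simp

lemma pvFoldCons {α β : Type} (c : α → β) : ∀ (L : List α) (st : List β),
    L.foldl (fun st i => c i :: st) st = (L.map c).reverse ++ st := by
  intro L
  induction L with
  | nil => intro st; simp
  | cons a L ih => intro st; simp [ih, List.append_assoc]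

lemma pvRangeLen (z : Int) : (PySem.List.pyRange 0 z).length = z.toNat := by
  by_cases hz : 0 ≤ z
  · obtain ⟨k, rfl⟩ : ∃ k : Nat, z = (k : Int) := ⟨z.toNat, (Int.toNat_of_nonneg hz).symm⟩
    simp [PySem.List.pyRange_zero_natCast]
  · rw [PySem.List.pyRange_one_eq_nil (by omega)]
    simp; omega

lemma pvContains_iff (t : List String) (x : List Char) :
    PySem.Set.contains (PySem.Set.ofList t) (String.ofList x) = true ↔ x ∈ t.map String.toList := by
  rw [PySem.Set.contains_iff, PySem.Set.mem_ofList]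
  constructor
  · intro h
    exact (List.mem_map).2 ⟨String.ofList x, h, String.toList_ofList⟩
  · intro h
    obtain ⟨y, hy, hxy⟩ := (List.mem_map).1 h
    rw [← hxy, String.ofList_toList]
    exact hy

lemma pvBuildA_to_nat (n : Int) (l : List (List Char)) (xo : List Int)
    (hl : l.length = n.toNat) (hn : 0 ≤ n) :
    pvBuildA n l xo = (List.range l.length).foldl (pvBodyN l xo) [] := by
  unfold pvBuildA
  have hn' : n = (l.length : Int) := by omega
  subst hn'
  rw [PySem.List.pyRange_zero_natCast, List.foldl_map]
  refine PySem.List.foldl_congr_mem _ _ _ _ ?_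
  intro acc k hk
  have hklt : k < l.length := List.mem_range.1 hk
  by_cases h : (k : Int) < (l.length : Int) - 1
  · rw [if_pos h]
    simp only [pvBodyN, PySem.List.pyGetD_natCast, PySem.List.pyRepeat_singleton]
    rw [if_pos (by omega)]
  · rw [if_neg h]
    simp only [pvBodyN, PySem.List.pyGetD_natCast]
    rw [if_neg (by omega)]

lemma pvRangeFold_inter : ∀ (l : List (List Char)) (xo : List Int) (acc : List Char),
    xo.length + 1 = l.length →
    (List.range l.length).foldl (pvBodyN l xo) acc = acc ++ pvInter l xo := by
  intro l
  induction l with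
  | nil => intro xo acc h; simp at h
  | cons a l' ih =>
    intro xo acc h
    cases l' with
    | nil =>
      have : xo = [] := by simpa using h
      subst this
      simp [pvBodyN, pvInter, pvTail, List.range_succ]
    | cons b rest =>
      cases xo with
      | nil => simp at h
      | cons g gs =>
        rw [List.length_cons, List.range_succ_eq_map, List.foldl_cons, List.foldl_map]
        have hstep : pvBodyN (a :: b :: rest) (g :: gs) acc 0
            = acc ++ a ++ List.replicate g.toNat '_' := by
          simp [pvBodyN]
        rw [hstep]
        have hshift : ∀ (x : List Char) (j : Nat), j ∈ List.range (b :: rest).length →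
            pvBodyN (a :: b :: rest) (g :: gs) x (Nat.succ j) = pvBodyN (b :: rest) gs x j := by
          intro x j hj
          simp only [pvBodyN, List.getD_cons_succ, List.length_cons]
          by_cases hc : j + 1 < rest.length + 1
          · rw [if_pos (by omega), if_pos (by omega)]
          · rw [if_neg (by omega), if_neg (by omega)]
        rw [PySem.List.foldl_congr_mem _ _ _ _ hshift]
        rw [ih gs (acc ++ a ++ List.replicate g.toNat '_') (by simpa using h)]
        simp [pvInter, pvTail, List.append_assoc]

lemma pvBuildA_eq (n : Int) (l : List (List Char)) (xo : List Int)
    (hl : l.length = n.toNat) (hx : xo.length + 1 = l.length ∨ l = []) :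
    pvBuildA n l xo = pvInter l xo := by
  rcases hx with hx | rfl
  · have hn : 0 ≤ n ∨ n < 0 := by omega
    rcases hn with hn | hn
    · rw [pvBuildA_to_nat n l xo hl hn, pvRangeFold_inter l xo [] hx]
      rfl
    · exfalso
      have : l.length = 0 := by omega
      omega
  · unfold pvBuildA
    by_cases hn : 0 ≤ n
    · have : n = 0 := by simp at hl; omega
      subst this
      simp [PySem.List.pyRange_one_eq_nil, pvInter]
    · rw [PySem.List.pyRange_one_eq_nil (by omega)]
      simp [pvInter]

lemma pvNeed_pos (M : Nat) (x : List Char) : 1 ≤ pvNeed M x := by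
  unfold pvNeed; omega

lemma pvDfs_stab (n : Int) (t : List String) (names : List (List Char))
    (hn : names.length = n.toNat) :
    ∀ (d₁ d₂ : Nat) (gaps : List Int), pvGood n gaps →
    pvNeed (pvMaxLen t) (pvBuildB names gaps) ≤ d₁ →
    pvNeed (pvMaxLen t) (pvBuildB names gaps) ≤ d₂ →
    pvDfsB n names (PySem.Set.ofList t) d₁ gaps = pvDfsB n names (PySem.Set.ofList t) d₂ gaps := by
  intro d₁
  induction d₁ with
  | zero =>
    intro d₂ gaps hg h1 h2
    exact absurd h1 (by have := pvNeed_pos (pvMaxLen t) (pvBuildB names gaps); omega)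
  | succ a ih =>
    intro d₂ gaps hg h1 h2
    cases d₂ with
    | zero =>
      exact absurd h2 (by have := pvNeed_pos (pvMaxLen t) (pvBuildB names gaps); omega)
    | succ b =>
      simp only [pvDfsB]
      by_cases hmem : PySem.Set.contains (PySem.Set.ofList t) (String.ofList (pvBuildB names gaps)) = true
      · rw [if_neg (not_not_intro hmem), if_neg (not_not_intro hmem)]
        by_cases h16 : (pvBuildB names gaps).length = 16
        · rw [if_pos h16, if_pos h16]
        · rw [if_neg h16, if_neg h16]
          have hxlen : (pvBuildB names gaps).length ≤ pvMaxLen t :=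
            pvLen_le t _ ((pvContains_iff t _).1 hmem)
          apply pvFindSome?_congr
          intro i hi
          have hi' : 0 ≤ i ∧ i < n - 1 :=
            (PySem.List.mem_pyRange_one).1 ((List.mem_reverse).1 hi)
          obtain ⟨hglen, hpos⟩ := hg
          have hn2 : (2:Int) ≤ n := by omega
          have hit : i.toNat < gaps.length := by omega
          rw [pvChild_eq gaps i hi'.1 hit]
          have hmemg : gaps.getD i.toNat 0 ∈ gaps := by
            rw [List.getD_eq_getElem gaps 0 hit]
            exact List.getElem_mem hit
          have hcg : pvGood n (gaps.set i.toNat (gaps.getD i.toNat 0 + 1)) := by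
            refine ⟨by simp [hglen], ?_⟩
            intro e he
            rcases List.mem_or_eq_of_mem_set he with h | h
            · exact hpos e h
            · have := hpos _ hmemg; omega
          have hclen : (pvBuildB names (gaps.set i.toNat (gaps.getD i.toNat 0 + 1))).length
              = (pvBuildB names gaps).length + 1 := by
            rw [pvBuildB_eq, pvBuildB_eq]
            exact pvInter_set_len names gaps i.toNat (by omega) hit
              (fun e he => by have := hpos e he; omega)
          have hneed : pvNeed (pvMaxLen t) (pvBuildB names (gaps.set i.toNat (gaps.getD i.toNat 0 + 1)))
              = pvNeed (pvMaxLen t) (pvBuildB names gaps) - 1 := by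
            unfold pvNeed
            rw [hclen]
            have h1 := pvNeed_pos (pvMaxLen t) (pvBuildB names gaps)
            omega
          have hne1 : 2 ≤ pvNeed (pvMaxLen t) (pvBuildB names gaps) := by
            unfold pvNeed; omega
          exact ih b _ hcg (by omega) (by omega)
      · rw [if_pos hmem, if_pos hmem]

lemma pvGood_child (n : Int) (u : List Int) (i : Int) (hg : pvGood n u)
    (h0 : 0 ≤ i) (hi : i < n - 1) :
    pvGood n (u.set i.toNat (u.getD i.toNat 0 + 1)) := by
  obtain ⟨hlen, hpos⟩ := hg
  have hit : i.toNat < u.length := by omega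
  have hmemg : u.getD i.toNat 0 ∈ u := by
    rw [List.getD_eq_getElem u 0 hit]
    exact List.getElem_mem hit
  refine ⟨by simp [hlen], ?_⟩
  intro e he
  rcases List.mem_or_eq_of_mem_set he with h | h
  · exact hpos e h
  · have := hpos _ hmemg; omega

lemma pvNeed_child (n : Int) (t : List String) (names : List (List Char)) (u : List Int)
    (hn : names.length = n.toNat) (hg : pvGood n u) (i : Int) (h0 : 0 ≤ i) (hi : i < n - 1)
    (hxm : pvBuildB names u ∈ t.map String.toList) :
    pvNeed (pvMaxLen t) (pvBuildB names (u.set i.toNat (u.getD i.toNat 0 + 1)))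
      = pvNeed (pvMaxLen t) (pvBuildB names u) - 1 := by
  obtain ⟨hglen, hpos⟩ := hg
  have hn2 : (2:Int) ≤ n := by omega
  have hit : i.toNat < u.length := by omega
  have hxlen : (pvBuildB names u).length ≤ pvMaxLen t := pvLen_le t _ hxm
  have hclen : (pvBuildB names (u.set i.toNat (u.getD i.toNat 0 + 1))).length
      = (pvBuildB names u).length + 1 := by
    rw [pvBuildB_eq, pvBuildB_eq]
    exact pvInter_set_len names u i.toNat (by omega) (by omega)
      (fun e he => by have := hpos e he; omega)
  unfold pvNeed
  rw [hclen]
  omega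

lemma pvRunA_spec (n : Int) (t : List String) (l : List (List Char))
    (hn : l.length = n.toNat) :
    ∀ (fuel : Nat) (stack : List (List Int)), (∀ u ∈ stack, pvGood n u) →
    (stack.map (fun u => (max n 2).toNat ^ pvNeed (pvMaxLen t) (pvBuildB l u))).sum ≤ fuel →
    pvRunA n l (t.map String.toList) fuel stack =
      (match stack.findSome? (fun u => pvDfsB n l (PySem.Set.ofList t)
          (pvNeed (pvMaxLen t) (pvBuildB l u)) u) with
       | some x => x
       | none => ['-', '1']) := by
  have hb2 : 2 ≤ (max n 2).toNat := by
    have := le_max_right n 2; omega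
  intro fuel
  induction fuel with
  | zero =>
    intro stack hg hc
    cases stack with
    | nil => simp only [pvRunA, List.findSome?_nil]
    | cons u rest =>
      exfalso
      have hpow : 0 < (max n 2).toNat ^ pvNeed (pvMaxLen t) (pvBuildB l u) :=
        Nat.pow_pos (by omega)
      simp only [List.map_cons, List.sum_cons] at hc
      omega
  | succ f ihf =>
    intro stack hg hc
    cases stack with
    | nil => simp only [pvRunA, List.findSome?_nil]
    | cons u rest =>
      have hgu := hg u List.mem_cons_self
      have hgrest : ∀ v ∈ rest, pvGood n v := fun v hv => hg v (List.mem_cons_of_mem _ hv)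
      have hbuild : pvBuildA n l u = pvBuildB l u := by
        rw [pvBuildB_eq]
        apply pvBuildA_eq n l u hn
        by_cases h1 : 1 ≤ n
        · left; have := hgu.1; omega
        · right; apply List.eq_nil_of_length_eq_zero; omega
      obtain ⟨k, hk⟩ : ∃ k, pvNeed (pvMaxLen t) (pvBuildB l u) = k + 1 :=
        ⟨pvNeed (pvMaxLen t) (pvBuildB l u) - 1,
          by have := pvNeed_pos (pvMaxLen t) (pvBuildB l u); omega⟩
      simp only [pvRunA, List.findSome?_cons, hk, pvDfsB]
      rw [hbuild]
      by_cases hxm : pvBuildB l u ∈ t.map String.toList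
      · rw [if_neg (not_not_intro hxm),
          if_neg (not_not_intro ((pvContains_iff t (pvBuildB l u)).2 hxm))]
        simp only [List.map_cons, List.sum_cons, hk] at hc
        have hpowpos : 0 < (max n 2).toNat ^ k := Nat.pow_pos (by omega)
        have hpowpos1 : 0 < (max n 2).toNat ^ (k + 1) := Nat.pow_pos (by omega)
        by_cases h16 : (pvBuildB l u).length = 16
        · rw [if_pos h16, if_pos h16]
          rw [ihf rest hgrest (by omega)]
        · rw [if_neg h16, if_neg h16]
          rw [pvFoldCons (pvChildA u)]
          have hcost : ∀ i ∈ PySem.List.pyRange 0 (n-1),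
              (max n 2).toNat ^ pvNeed (pvMaxLen t) (pvBuildB l (pvChildA u i))
                = (max n 2).toNat ^ k := by
            intro i hi
            obtain ⟨h0, hilt⟩ := (PySem.List.mem_pyRange_one).1 hi
            rw [pvChildA_eq u i h0, pvNeed_child n t l u hn hgu i h0 hilt hxm, hk]
            norm_num
          have hCL : (PySem.List.pyRange 0 (n-1)).length = (n-1).toNat := pvRangeLen _
          have hsum : ((((PySem.List.pyRange 0 (n-1)).map (pvChildA u)).reverse ++ rest).map
              (fun v => (max n 2).toNat ^ pvNeed (pvMaxLen t) (pvBuildB l v))).sum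
              = (n-1).toNat * (max n 2).toNat ^ k
                + (rest.map (fun v => (max n 2).toNat ^ pvNeed (pvMaxLen t) (pvBuildB l v))).sum := by
            rw [List.map_append, List.sum_append, List.map_reverse, List.sum_reverse,
              List.map_map]
            simp only [Function.comp_def]
            rw [List.map_congr_left (fun i hi => hcost i hi)]
            simp [hCL, List.sum_replicate]
          have hmul : ((n-1).toNat + 1) * (max n 2).toNat ^ k
              ≤ (max n 2).toNat ^ (k + 1) := by
            rw [pow_succ]
            have hle : (n-1).toNat + 1 ≤ (max n 2).toNat := by
              have := le_max_left n 2; omega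
            calc ((n-1).toNat + 1) * (max n 2).toNat ^ k
                ≤ (max n 2).toNat * (max n 2).toNat ^ k := Nat.mul_le_mul_right _ hle
              _ = (max n 2).toNat ^ k * (max n 2).toNat := Nat.mul_comm _ _
          have hcost' : ((((PySem.List.pyRange 0 (n-1)).map (pvChildA u)).reverse ++ rest).map
              (fun v => (max n 2).toNat ^ pvNeed (pvMaxLen t) (pvBuildB l v))).sum ≤ f := by
            rw [hsum]
            have hx1 : (n-1).toNat * (max n 2).toNat ^ k + (max n 2).toNat ^ k
                = ((n-1).toNat + 1) * (max n 2).toNat ^ k := by ring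
            omega
          have hgood' : ∀ v ∈ ((PySem.List.pyRange 0 (n-1)).map (pvChildA u)).reverse ++ rest,
              pvGood n v := by
            intro v hv
            rcases List.mem_append.1 hv with hv | hv
            · obtain ⟨i, hi, rfl⟩ := List.mem_map.1 (List.mem_reverse.1 hv)
              obtain ⟨h0, hilt⟩ := (PySem.List.mem_pyRange_one).1 hi
              rw [pvChildA_eq u i h0]
              exact pvGood_child n u i hgu h0 hilt
            · exact hgrest v hv
          rw [ihf _ hgood' hcost']
          have hchildren : (((PySem.List.pyRange 0 (n-1)).map (pvChildA u)).reverse).findSome?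
              (fun v => pvDfsB n l (PySem.Set.ofList t) (pvNeed (pvMaxLen t) (pvBuildB l v)) v)
              = (PySem.List.pyRange 0 (n-1)).reverse.findSome?
                  (fun i => pvDfsB n l (PySem.Set.ofList t) k (pvChildB u i)) := by
            rw [← List.map_reverse, List.findSome?_map]
            apply pvFindSome?_congr
            intro i hi
            obtain ⟨h0, hilt⟩ := (PySem.List.mem_pyRange_one).1 (List.mem_reverse.1 hi)
            have hguc : u.getD i.toNat 0 = u.getD i.toNat 0 := rfl
            simp only [Function.comp_def]
            rw [pvChildA_eq u i h0, pvNeed_child n t l u hn hgu i h0 hilt hxm, hk,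
              pvChild_eq u i h0 (by have := hgu.1; omega)]
            simp
          rw [List.findSome?_append, hchildren]
          cases hR : (PySem.List.pyRange 0 (n-1)).reverse.findSome?
              (fun i => pvDfsB n l (PySem.Set.ofList t) k (pvChildB u i)) <;>
            cases hRest : rest.findSome?
              (fun v => pvDfsB n l (PySem.Set.ofList t) (pvNeed (pvMaxLen t) (pvBuildB l v)) v) <;>
            simp [Option.or]
      · rw [if_pos hxm, if_pos ((pvContains_iff t (pvBuildB l u)).not.2 hxm)]

-- ===== VERDICT (by name: the statement is the Claim_ definition above) =====
theorem solve_spec : Claim_equal_solve := by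
  unfold Claim_equal_solve Spec_solve
  intro n m s t _ _
  unfold solve solve_alt
  simp only []
  set l := (PySem.List.pyRange 0 n).map (fun i => ((PySem.List.pyGet? s i).getD "").toList) with hl
  set root := List.replicate (n - 1).toNat (1 : Int) with hroot
  have hln : l.length = n.toNat := by rw [hl, List.length_map, pvRangeLen]
  have hgroot : pvGood n root := by
    refine ⟨by simp [hroot], ?_⟩
    intro e he
    have := List.eq_of_mem_replicate he
    omega
  have hb2 : 2 ≤ (max n 2).toNat := by have := le_max_right n 2; omega
  have hneedroot : pvNeed (pvMaxLen t) (pvBuildB l root) ≤ pvMaxLen t + 2 := by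
    unfold pvNeed; omega
  have hfuel : ((([root] : List (List Int))).map
      (fun u => (max n 2).toNat ^ pvNeed (pvMaxLen t) (pvBuildB l u))).sum
      ≤ (max n 2).toNat ^ (pvMaxLen t + 18) := by
    simp only [List.map_cons, List.map_nil, List.sum_cons, List.sum_nil, Nat.add_zero]
    exact Nat.pow_le_pow_right (by omega) (by omega)
  rw [pvRunA_spec n t l hln _ [root]
    (by intro u hu; rw [List.mem_singleton] at hu; rw [hu]; exact hgroot) hfuel]
  rw [pvDfs_stab n t l hln (pvMaxLen t + 18) (pvNeed (pvMaxLen t) (pvBuildB l root)) root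
    hgroot (by omega) (le_refl _)]
  simp only [List.findSome?_cons, List.findSome?_nil]
  cases hX : pvDfsB n l (PySem.Set.ofList t) (pvNeed (pvMaxLen t) (pvBuildB l root)) root with
  | none => rfl
  | some x => rfl
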